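-- pv_equiv track=rewrite | github.com/Hedriss10/hub-banking-platform | tests/integration/conftest.py | _sqlalchemy_asyncpg_url
-- ===== SOURCE A (Python) =====
-- def _sqlalchemy_asyncpg_url(raw_url: str) -> str:
--     """
--     Testcontainers PostgresContainer usa driver=psycopg2 por padrão (postgresql+psycopg2://).
--     SQLAlchemy async precisa de postgresql+asyncpg://; asyncpg puro aceita só postgresql://.
--     """
--     if raw_url.startswith('postgresql+asyncpg://'):
--         return raw_url
--     for prefix in (
--         'postgresql+psycopg2://',
--         'postgresql+psycopg://',
--         'postgresql://',
--     ):
--         if raw_url.startswith(prefix):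
--             return 'postgresql+asyncpg://' + raw_url[len(prefix) :]
--     msg = f'URI PostgreSQL não suportada para asyncpg/SQLAlchemy: {raw_url!r}'
--     raise ValueError(msg)
-- ===== SOURCE B (Python) =====
-- _SCHEMES = {'postgresql', 'postgresql+psycopg2', 'postgresql+psycopg', 'postgresql+asyncpg'}
--
--
-- def _sqlalchemy_asyncpg_url(raw_url: str) -> str:
--     scheme, sep, rest = raw_url.partition('://')
--     if sep and scheme in _SCHEMES:
--         return 'postgresql+asyncpg://' + rest
--     msg = f'URI PostgreSQL não suportada para asyncpg/SQLAlchemy: {raw_url!r}'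
--     raise ValueError(msg)
-- ===== Notes on version B (the rewrite author's own statement) =====
-- stated objective: simpler
-- what changed: Replaces A's early-return plus per-prefix startswith loop with a single partition at the first '://' followed by one membership test of the scheme against the fixed four-element set, folding the asyncpg passthrough into the same rebuild.
-- outside the precondition, e.g. on _sqlalchemy_asyncpg_url('mysql://h/db'): A raises ValueError, B raises ValueError; on _sqlalchemy_asyncpg_url('://'): A raises ValueError, B raises ValueError
import Mathlib
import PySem

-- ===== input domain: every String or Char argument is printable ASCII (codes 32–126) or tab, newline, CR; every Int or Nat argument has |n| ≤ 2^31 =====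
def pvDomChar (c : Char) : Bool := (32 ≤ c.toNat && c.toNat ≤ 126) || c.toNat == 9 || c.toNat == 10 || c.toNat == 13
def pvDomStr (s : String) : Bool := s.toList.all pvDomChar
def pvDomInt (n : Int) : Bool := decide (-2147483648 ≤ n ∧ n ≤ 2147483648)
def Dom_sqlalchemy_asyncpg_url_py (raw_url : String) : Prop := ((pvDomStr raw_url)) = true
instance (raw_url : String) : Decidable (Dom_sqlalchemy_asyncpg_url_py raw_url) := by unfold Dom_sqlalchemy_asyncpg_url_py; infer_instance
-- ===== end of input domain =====

-- B replaces A's per-prefix startswith chain by one partition at the first "://" plus a scheme-set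
-- membership test (objective: simpler); equivalence is about the RETURN value on inputs where A returns
-- (on all other inputs both Pythons raise the identical ValueError; those inputs are outside Pre_).

-- ===== PORT A =====
-- transliteration of A's startswith chain; raw_url[len(prefix):] is Chars.slice, '+' on str is list append under String.ofList
def sqlalchemy_asyncpg_url_py (raw_url : String) : String :=
  if PySem.Chars.startswith raw_url.toList "postgresql+asyncpg://".toList then raw_url
  else if PySem.Chars.startswith raw_url.toList "postgresql+psycopg2://".toList then
    String.ofList ("postgresql+asyncpg://".toList ++ PySem.Chars.slice raw_url.toList (some 22) none)
  else if PySem.Chars.startswith raw_url.toList "postgresql+psycopg://".toList then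
    String.ofList ("postgresql+asyncpg://".toList ++ PySem.Chars.slice raw_url.toList (some 21) none)
  else if PySem.Chars.startswith raw_url.toList "postgresql://".toList then
    String.ofList ("postgresql+asyncpg://".toList ++ PySem.Chars.slice raw_url.toList (some 13) none)
  else ""  -- Python raises ValueError here; excluded by Pre_

-- ===== PORT B =====
-- str.partition('://') ported by hand over List Char: splits at the FIRST occurrence of "://";
-- returns none when "://" does not occur (Python's empty-separator branch). Exact.
def pvPartitionSep (acc : List Char) : List Char → Option (List Char × List Char)
  | [] => none
  | c :: t =>
    if c = ':' ∧ t.take 2 = ['/', '/'] then some (acc.reverse, t.drop 2)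
    else pvPartitionSep (c :: acc) t

def sqlalchemy_asyncpg_url_py_alt (raw_url : String) : String :=
  match pvPartitionSep [] raw_url.toList with
  | some (scheme, rest) =>
    if scheme ∈ ["postgresql".toList, "postgresql+psycopg2".toList,
                 "postgresql+psycopg".toList, "postgresql+asyncpg".toList] then
      String.ofList ("postgresql+asyncpg://".toList ++ rest)
    else ""  -- Python raises ValueError here; excluded by Pre_
  | none => ""  -- Python raises ValueError here; excluded by Pre_

-- ===== PRECONDITION & SPEC =====
-- Pre_ excludes exactly the inputs on which A (and B) raise ValueError: URLs not starting with one of the four accepted schemes.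
def Pre_sqlalchemy_asyncpg_url_py (raw_url : String) : Prop :=
  PySem.Str.startswith raw_url "postgresql+asyncpg://" = true ∨
  PySem.Str.startswith raw_url "postgresql+psycopg2://" = true ∨
  PySem.Str.startswith raw_url "postgresql+psycopg://" = true ∨
  PySem.Str.startswith raw_url "postgresql://" = true
instance (raw_url : String) : Decidable (Pre_sqlalchemy_asyncpg_url_py raw_url) := by unfold Pre_sqlalchemy_asyncpg_url_py; infer_instance

def pvWitness_sqlalchemy_asyncpg_url_py : String := "postgresql://user:pw@localhost:5432/db"

def Spec_sqlalchemy_asyncpg_url_py (raw_url : String) (out : String) : Prop := out = sqlalchemy_asyncpg_url_py_alt raw_url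
instance (raw_url : String) (out : String) : Decidable (Spec_sqlalchemy_asyncpg_url_py raw_url out) := by unfold Spec_sqlalchemy_asyncpg_url_py; infer_instance

-- ===== CLAIM (what is proved, stated in full; the proofs are below) =====
def Claim_equal_sqlalchemy_asyncpg_url_py : Prop := ∀ (raw_url : String), Dom_sqlalchemy_asyncpg_url_py raw_url → Pre_sqlalchemy_asyncpg_url_py raw_url → Spec_sqlalchemy_asyncpg_url_py raw_url (sqlalchemy_asyncpg_url_py raw_url)

-- ===== LEMMAS AND PROOFS =====

-- partition at the separator: if the part before "://" has no ':', it is found exactly there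
theorem pvPartitionSep_append (sch rest : List Char) (h : ':' ∉ sch) (acc : List Char) :
    pvPartitionSep acc (sch ++ ':' :: '/' :: '/' :: rest) = some (acc.reverse ++ sch, rest) := by
  induction sch generalizing acc with
  | nil => simp [pvPartitionSep]
  | cons c t ih =>
    have hc : ¬ (c = ':') := fun hcc => h (hcc ▸ List.mem_cons_self)
    have ht : ':' ∉ t := fun hm => h (List.mem_cons_of_mem _ hm)
    simp only [List.cons_append, pvPartitionSep, hc, false_and, if_false]
    rw [ih ht]
    simp

-- two incomparable lists, neither a prefix of the other one's extension
theorem not_prefix_of_append {α : Type} (p q rest : List α) (h1 : ¬ p <+: q) (h2 : ¬ q <+: p) :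
    ¬ p <+: q ++ rest := by
  intro h
  rcases List.prefix_or_prefix_of_prefix h (List.prefix_append q rest) with hp | hp
  · exact h1 hp
  · exact h2 hp

theorem startswith_false (p q rest : List Char) (h1 : ¬ p <+: q) (h2 : ¬ q <+: p) :
    PySem.Chars.startswith (q ++ rest) p = false := by
  rw [Bool.eq_false_iff]
  intro hb
  exact not_prefix_of_append p q rest h1 h2 ((PySem.Chars.startswith_iff _ _).mp hb)

theorem startswith_true (p rest : List Char) : PySem.Chars.startswith (p ++ rest) p = true :=
  (PySem.Chars.startswith_iff _ _).mpr (List.prefix_append p rest)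

-- ===== VERDICT (by name: the statement is the Claim_ definition above) =====
theorem sqlalchemy_asyncpg_url_py_spec : Claim_equal_sqlalchemy_asyncpg_url_py := by
  intro raw_url _ hpre
  unfold Spec_sqlalchemy_asyncpg_url_py sqlalchemy_asyncpg_url_py sqlalchemy_asyncpg_url_py_alt
  rcases hpre with h | h | h | h <;> rw [PySem.Str.startswith_eq] at h
  · -- raw_url starts with 'postgresql+asyncpg://'
    obtain ⟨rest, hr⟩ := (PySem.Chars.startswith_iff _ _).mp h
    have hsplit : "postgresql+asyncpg://".toList ++ rest
        = "postgresql+asyncpg".toList ++ ':' :: '/' :: '/' :: rest := by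
      have e : "postgresql+asyncpg://".toList = "postgresql+asyncpg".toList ++ [':', '/', '/'] := by decide
      rw [e]; simp
    rw [← hr, startswith_true, hsplit, pvPartitionSep_append _ _ (by decide) []]
    simp only [List.reverse_nil, List.nil_append]
    have hm : "postgresql+asyncpg".toList ∈ ["postgresql".toList, "postgresql+psycopg2".toList,
        "postgresql+psycopg".toList, "postgresql+asyncpg".toList] := by decide
    rw [if_pos hm, hr, String.ofList_toList]
    simp
  · -- raw_url starts with 'postgresql+psycopg2://'
    obtain ⟨rest, hr⟩ := (PySem.Chars.startswith_iff _ _).mp h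
    have hsplit : "postgresql+psycopg2://".toList ++ rest
        = "postgresql+psycopg2".toList ++ ':' :: '/' :: '/' :: rest := by
      have e : "postgresql+psycopg2://".toList = "postgresql+psycopg2".toList ++ [':', '/', '/'] := by decide
      rw [e]; simp
    rw [← hr,
      startswith_false "postgresql+asyncpg://".toList "postgresql+psycopg2://".toList rest (by decide) (by decide),
      startswith_true]
    have hs : PySem.Chars.slice ("postgresql+psycopg2://".toList ++ rest) (some 22) none = rest := by
      rw [PySem.Chars.slice_eq_listSlice, PySem.List.slice_from _ (by norm_num)]
      simp
    rw [hs, hsplit, pvPartitionSep_append _ _ (by decide) []]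
    simp
  · -- raw_url starts with 'postgresql+psycopg://'
    obtain ⟨rest, hr⟩ := (PySem.Chars.startswith_iff _ _).mp h
    have hsplit : "postgresql+psycopg://".toList ++ rest
        = "postgresql+psycopg".toList ++ ':' :: '/' :: '/' :: rest := by
      have e : "postgresql+psycopg://".toList = "postgresql+psycopg".toList ++ [':', '/', '/'] := by decide
      rw [e]; simp
    rw [← hr,
      startswith_false "postgresql+asyncpg://".toList "postgresql+psycopg://".toList rest (by decide) (by decide),
      startswith_false "postgresql+psycopg2://".toList "postgresql+psycopg://".toList rest (by decide) (by decide),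
      startswith_true]
    have hs : PySem.Chars.slice ("postgresql+psycopg://".toList ++ rest) (some 21) none = rest := by
      rw [PySem.Chars.slice_eq_listSlice, PySem.List.slice_from _ (by norm_num)]
      simp
    rw [hs, hsplit, pvPartitionSep_append _ _ (by decide) []]
    simp
  · -- raw_url starts with 'postgresql://'
    obtain ⟨rest, hr⟩ := (PySem.Chars.startswith_iff _ _).mp h
    have hsplit : "postgresql://".toList ++ rest
        = "postgresql".toList ++ ':' :: '/' :: '/' :: rest := by
      have e : "postgresql://".toList = "postgresql".toList ++ [':', '/', '/'] := by decide
      rw [e]; simp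
    rw [← hr,
      startswith_false "postgresql+asyncpg://".toList "postgresql://".toList rest (by decide) (by decide),
      startswith_false "postgresql+psycopg2://".toList "postgresql://".toList rest (by decide) (by decide),
      startswith_false "postgresql+psycopg://".toList "postgresql://".toList rest (by decide) (by decide),
      startswith_true]
    have hs : PySem.Chars.slice ("postgresql://".toList ++ rest) (some 13) none = rest := by
      rw [PySem.Chars.slice_eq_listSlice, PySem.List.slice_from _ (by norm_num)]
      simp
    rw [hs, hsplit, pvPartitionSep_append _ _ (by decide) []]
    simp
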